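-- pv_equiv track=rewrite | github.com/ArturSanin/Python_Code | Small_Projects/Wolfram_Challenges/partitions_of_increasing_length/partition_longer.py | partition_longer
-- ===== SOURCE A (Python) =====
-- def partition_longer(some_list):
--     """
--
--     :param some_list: List.
--     :return: A list of lists where every sublist is one element bigger then the sublist before.
--     Example:
--         [1, 2, 3, 4, 5, 6] -> [[1], [2, 3], [4, 5, 6]]
--     """
--     list_partition_longer = []
--     partitions = []
--     some_list_length = len(some_list)
--     j = 0
--     for i in range(some_list_length):
--         j = j + i + 1
--         if j <= some_list_length:
--             partitions.append(i + 1)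
--         else:
--             break
--     partition_sum_lower = -1
--     partition_sum_upper = 0
--     for partition in partitions:
--         partition_sum_upper = partition_sum_upper + partition
--         help_list = []
--         while partition_sum_lower + 1 <= partition_sum_upper - 1:
--             help_list.append(some_list[partition_sum_lower + 1])
--             partition_sum_lower += 1
--         list_partition_longer.append(help_list)
--         partition_sum_lower = partition_sum_upper - 1
--     return list_partition_longer
-- ===== SOURCE B (Python) =====
-- def partition_longer(some_list):
--     result = []
--     start, length = 0, 1
--     while start + length <= len(some_list):
--         result.append(some_list[start:start + length])
--         start += length
--         length += 1
--     return result
-- ===== Notes on version B (the rewrite author's own statement) =====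
-- stated objective: simpler
-- what changed: B replaces A's two-pass structure (first building a table of partition sizes, then copying elements one by one with index bookkeeping in a nested while loop) by a single streaming loop that slices the next chunk of the current length and advances the start offset; bulk slicing removes the per-element Python-level copy loop.
import Mathlib
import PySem

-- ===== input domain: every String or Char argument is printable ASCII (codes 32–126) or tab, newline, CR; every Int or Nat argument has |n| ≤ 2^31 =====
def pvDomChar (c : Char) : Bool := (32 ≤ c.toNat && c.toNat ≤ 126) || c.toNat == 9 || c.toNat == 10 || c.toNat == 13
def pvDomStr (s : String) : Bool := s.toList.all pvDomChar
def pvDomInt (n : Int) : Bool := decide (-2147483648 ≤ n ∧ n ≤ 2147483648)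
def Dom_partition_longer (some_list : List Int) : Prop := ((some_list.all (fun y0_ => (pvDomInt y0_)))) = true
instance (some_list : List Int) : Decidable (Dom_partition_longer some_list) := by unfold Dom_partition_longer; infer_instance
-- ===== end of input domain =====

-- B replaces A's two passes (size table, then element-by-element copy) with one slicing loop; objective: simpler.

-- ===== PORT A =====
-- inner 'while partition_sum_lower + 1 <= partition_sum_upper - 1' loop of A
def pvWhileCopy (xs : List Int) (lower upper : Int) (acc : List Int) : List Int × Int :=
  if lower + 1 ≤ upper - 1 then
    pvWhileCopy xs (lower + 1) upper (acc ++ [PySem.List.pyGetD xs (lower + 1) 0])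
  else (acc, lower)
termination_by (upper - 1 - lower).toNat
decreasing_by omega

-- body of A's first 'for i in range(...)' loop, with a stopped flag for the 'break'
def pvLoop1Step (n : Int) (st : List Int × Int × Bool) (i : Int) : List Int × Int × Bool :=
  if st.2.2 then st
  else
    let j := st.2.1 + i + 1
    if j ≤ n then (st.1 ++ [i + 1], j, false) else (st.1, j, true)

-- body of A's second 'for partition in partitions' loop; state = (result, lower, upper)
def pvLoop2Step (xs : List Int) (st : List (List Int) × Int × Int) (p : Int) : List (List Int) × Int × Int :=
  let upper := st.2.2 + p
  let hl := (pvWhileCopy xs st.2.1 upper []).1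
  (st.1 ++ [hl], upper - 1, upper)

def partition_longer (some_list : List Int) : List (List Int) :=
  let n : Int := some_list.length
  let st1 := (PySem.List.pyRange 0 n 1).foldl (pvLoop1Step n) ([], 0, false)
  ((st1.1).foldl (pvLoop2Step some_list) ([], -1, 0)).1

-- ===== PORT B =====
-- B's while loop: slice off the next chunk, advance start, grow length
-- (the '0 < len' conjunct only serves termination; every actual call has len ≥ 1)
def pvChunks (xs : List Int) (start len : Nat) : List (List Int) :=
  if h : 0 < len ∧ start + len ≤ xs.length then
    PySem.List.slice xs (some (start : Int)) (some ((start : Int) + (len : Int))) ::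
      pvChunks xs (start + len) (len + 1)
  else []
termination_by xs.length - start
decreasing_by omega

def partition_longer_alt (some_list : List Int) : List (List Int) :=
  pvChunks some_list 0 1

-- ===== PRECONDITION & SPEC =====
def Spec_partition_longer (some_list : List Int) (out : List (List Int)) : Prop := out = partition_longer_alt some_list
instance (some_list : List Int) (out : List (List Int)) : Decidable (Spec_partition_longer some_list out) := by unfold Spec_partition_longer; infer_instance

-- ===== CLAIM (what is proved, stated in full; the proofs are below) =====
def Claim_equal_partition_longer : Prop := ∀ (some_list : List Int), Dom_partition_longer some_list → Spec_partition_longer some_list (partition_longer some_list)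

-- ===== LEMMAS AND PROOFS =====

-- the partition-size list A's first loop produces, as a recursive function
def pvPartsFrom (n c j : Int) (fuel : Nat) : List Int :=
  match fuel with
  | 0 => []
  | fuel + 1 => if j + c + 1 ≤ n then (c + 1) :: pvPartsFrom n (c + 1) (j + c + 1) fuel else []

lemma pvLoop1_stopped (n : Int) (l : List Int) (parts : List Int) (j : Int) :
    l.foldl (pvLoop1Step n) (parts, j, true) = (parts, j, true) := by
  induction l with
  | nil => rfl
  | cons a l ih => simpa [pvLoop1Step] using ih

lemma pvLoop1_eq (n : Nat) (fuel : Nat) : ∀ (c : Nat) (j : Int) (parts : List Int),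
    fuel = n - c →
    ((PySem.List.pyRange (c : Int) (n : Int) 1).foldl (pvLoop1Step n) (parts, j, false)).1
      = parts ++ pvPartsFrom n c j fuel := by
  induction fuel with
  | zero =>
    intro c j parts hf
    have hcn : (n : Int) ≤ (c : Int) := by exact_mod_cast Nat.le_of_sub_eq_zero hf.symm
    rw [PySem.List.pyRange_one_eq_nil hcn]
    simp [pvPartsFrom]
  | succ fuel ih =>
    intro c j parts hf
    have hcn : (c : Int) < (n : Int) := by exact_mod_cast Nat.lt_of_sub_eq_succ hf.symm
    rw [PySem.List.pyRange_one_cons hcn]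
    by_cases hcond : j + (c : Int) + 1 ≤ (n : Int)
    · simp only [List.foldl_cons, pvLoop1Step, if_pos hcond, if_neg (by simp : ¬ (false = true))]
      have ihh := ih (c + 1) (j + (c : Int) + 1) (parts ++ [(c : Int) + 1]) (by omega)
      push_cast at ihh
      rw [ihh, pvPartsFrom, if_pos hcond]
      simp
    · simp only [List.foldl_cons, pvLoop1Step, if_neg hcond, if_neg (by simp : ¬ (false = true))]
      rw [pvLoop1_stopped]
      rw [pvPartsFrom, if_neg hcond]
      simp

lemma pvWhileCopy_eq (xs : List Int) (len : Nat) : ∀ (lower : Int) (acc : List Int),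
    0 ≤ lower + 1 → lower + 1 + len ≤ xs.length →
    (pvWhileCopy xs lower (lower + 1 + len) acc).1
      = acc ++ (xs.drop (lower + 1).toNat).take len := by
  induction len with
  | zero =>
    intro lower acc _ _
    rw [pvWhileCopy]
    simp
  | succ len ih =>
    intro lower acc h0 hub
    have hlt : (lower + 1).toNat < xs.length := by omega
    rw [pvWhileCopy, if_pos (by omega)]
    have harg : lower + 1 + ((len : Nat) + 1 : Nat) = (lower + 1) + 1 + len := by push_cast; ring
    rw [harg, ih (lower + 1) _ (by omega) (by omega)]
    have hget : PySem.List.pyGetD xs (lower + 1) 0 = xs[(lower + 1).toNat] := by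
      have hi : lower + 1 = (((lower + 1).toNat : Nat) : Int) := by omega
      have hcast := PySem.List.pyGetD_natCast xs (lower + 1).toNat 0
      rw [← hi] at hcast
      rw [hcast, List.getD_eq_getElem xs 0 hlt]
    have h2 : (lower + 1 + 1).toNat = (lower + 1).toNat + 1 := by omega
    rw [hget, h2, List.drop_eq_getElem_cons hlt, List.take_succ_cons]
    simp

lemma pvLoop2_eq (xs : List Int) (fuel : Nat) : ∀ (c j : Nat) (res : List (List Int)),
    c ≤ j → fuel = xs.length - c →
    ((pvPartsFrom xs.length c j fuel).foldl (pvLoop2Step xs) (res, (j : Int) - 1, (j : Int))).1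
      = res ++ pvChunks xs j (c + 1) := by
  induction fuel with
  | zero =>
    intro c j res hcj hf
    have : xs.length ≤ c := Nat.le_of_sub_eq_zero hf.symm
    rw [pvChunks, dif_neg (by omega)]
    simp [pvPartsFrom]
  | succ fuel ih =>
    intro c j res hcj hf
    have hcn : c < xs.length := Nat.lt_of_sub_eq_succ hf.symm
    by_cases hcond : (j : Int) + (c : Int) + 1 ≤ (xs.length : Int)
    · have hcondN : j + (c + 1) ≤ xs.length := by omega
      rw [pvPartsFrom, if_pos hcond]
      simp only [List.foldl_cons, pvLoop2Step]
      have hhl : (pvWhileCopy xs ((j : Int) - 1) ((j : Int) + ((c : Int) + 1)) []).1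
          = (xs.drop j).take (c + 1) := by
        have hupper : (j : Int) + ((c : Int) + 1) = ((j : Int) - 1) + 1 + (c + 1 : Nat) := by
          push_cast; ring
        rw [hupper, pvWhileCopy_eq xs (c + 1) ((j : Int) - 1) [] (by omega) (by push_cast; omega)]
        have hnt : ((j : Int) - 1 + 1).toNat = j := by omega
        rw [hnt]
        simp
      rw [hhl]
      rw [show ((c : Int) + 1) = ((c + 1 : Nat) : Int) from by push_cast; ring]
      rw [show ((j : Int) + ((c + 1 : Nat) : Int)) = ((j + (c + 1) : Nat) : Int) from by push_cast; ring]
      rw [show ((j : Int) + (c : Int) + 1) = ((j + (c + 1) : Nat) : Int) from by push_cast; ring]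
      rw [ih (c + 1) (j + (c + 1)) (res ++ [(xs.drop j).take (c + 1)]) (by omega) (by omega)]
      conv_rhs => rw [pvChunks]
      rw [dif_pos (⟨by omega, hcondN⟩ : 0 < c + 1 ∧ j + (c + 1) ≤ xs.length)]
      rw [PySem.List.slice_natCast_add]
      simp
    · rw [pvPartsFrom, if_neg hcond]
      rw [pvChunks, dif_neg (by omega)]
      simp

-- ===== VERDICT (by name: the statement is the Claim_ definition above) =====
theorem partition_longer_spec : Claim_equal_partition_longer := by
  intro xs _
  show partition_longer xs = partition_longer_alt xs
  have h1 := pvLoop1_eq xs.length xs.length 0 0 [] (by omega)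
  have h2 := pvLoop2_eq xs xs.length 0 0 [] (le_refl 0) (by omega)
  simp only [Nat.cast_zero, zero_sub, List.nil_append, Nat.zero_add] at h1 h2
  show ((((PySem.List.pyRange 0 (xs.length : Int) 1).foldl (pvLoop1Step (xs.length : Int))
      ([], 0, false)).1).foldl (pvLoop2Step xs) ([], -1, 0)).1 = pvChunks xs 0 1
  rw [h1, h2]
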